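-- pv_equiv track=rewrite | github.com/ZebraForce9/Ex12 | ex12_utils.py | is_valid_path
-- ===== SOURCE A (Python) =====
-- from typing import Dict, List, Tuple, Optional, NewType
--
-- LEGAL_MOVES = [(1, 0), (-1, 0), (0, 1), (0, -1), (1, 1), (1, -1), (-1, 1), (-1, -1)]
--
-- Path = NewType('Path', List[Tuple[int, int]])
--
-- def is_valid_path(board: List[List[str]], path: Path, words: Dict[str, bool]) -> Optional[str]:
--     """
--     Check if a given path follows the rules of the game, is within the board and produces a word from the dictionary.
--
--     Args:
--         board: The game board.
--         path: The given path to check.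
--         words: A dictionary with all the words for the game.
--
--     Returns:
--         The word the path produces if it's legal, None otherwise.
--     """
--     if len(path) != len(set(path)):
--         return
--
--     word = ''
--
--     for j, coordinate in enumerate(path):
--         if not 0 <= coordinate[0] <= 3 or not 0 <= coordinate[1] <= 3:
--             return
--
--         letter = board[coordinate[0]][coordinate[1]]
--
--         if j == len(path)-1:
--             word += letter
--             break
--
--         difference = (coordinate[0] - path[j+1][0], coordinate[1] - path[j+1][1])
--
--         if difference not in LEGAL_MOVES:
--             return
--
--         word += letter
--
--     if word in words:
--         return word
-- ===== SOURCE B (Python) =====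
-- LEGAL_MOVES = [(1, 0), (-1, 0), (0, 1), (0, -1), (1, 1), (1, -1), (-1, 1), (-1, -1)]
--
--
-- def is_valid_path(board, path, words):
--     """Three separate validity passes, then one board read to build the word."""
--     if len(path) != len(set(path)):
--         return None
--     if not all(0 <= x <= 3 and 0 <= y <= 3 for x, y in path):
--         return None
--     if not all((a[0] - b[0], a[1] - b[1]) in LEGAL_MOVES
--                for a, b in zip(path, path[1:])):
--         return None
--     word = ''.join(board[x][y] for x, y in path)
--     return word if word in words else None
-- ===== Notes on version B (the rewrite author's own statement) =====
-- stated objective: simpler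
-- what changed: A's single interleaved loop (bounds check, board read, move check and word building mixed with break/early returns) is decomposed into three independent all(...) passes (duplicates, bounds, legal moves) followed by one ''.join over the board cells.
-- outside the precondition, e.g. on is_valid_path([], [(0, 0), (0, 0)], {}): A returns None, B returns None
import Mathlib
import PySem

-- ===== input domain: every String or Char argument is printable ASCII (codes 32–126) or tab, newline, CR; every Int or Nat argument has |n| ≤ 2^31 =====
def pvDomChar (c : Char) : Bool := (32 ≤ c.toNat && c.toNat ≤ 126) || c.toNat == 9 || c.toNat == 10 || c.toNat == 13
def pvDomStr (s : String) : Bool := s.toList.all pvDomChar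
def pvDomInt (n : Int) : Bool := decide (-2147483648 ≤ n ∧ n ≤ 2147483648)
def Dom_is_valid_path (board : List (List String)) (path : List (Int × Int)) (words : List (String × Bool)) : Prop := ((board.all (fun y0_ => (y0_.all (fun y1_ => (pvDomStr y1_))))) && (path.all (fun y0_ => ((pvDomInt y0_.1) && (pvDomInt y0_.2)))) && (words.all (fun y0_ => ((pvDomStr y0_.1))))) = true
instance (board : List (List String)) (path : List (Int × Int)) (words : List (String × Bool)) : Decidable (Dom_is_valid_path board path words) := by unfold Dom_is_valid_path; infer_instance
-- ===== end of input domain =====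

-- B replaces A's single interleaved loop (bounds check, board read, move check, word building,
-- break/early returns) by three independent validity passes followed by one join over the board
-- cells: simpler decomposition, same O(n) cost.

-- ===== PORT A =====
def pvLegalMoves : List (Int × Int) :=
  [(1, 0), (-1, 0), (0, 1), (0, -1), (1, 1), (1, -1), (-1, 1), (-1, -1)]

-- letter = board[coordinate[0]][coordinate[1]]; none = IndexError (excluded by Pre_)
def pvRead (board : List (List String)) (c : Int × Int) : Option String :=
  (PySem.List.pyGet? board c.1).bind (fun row => PySem.List.pyGet? row c.2)

-- A's `for j, coordinate in enumerate(path)` loop; `rest` = path[j:], `word` = the accumulator.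
-- `rest = []` means the loop finished normally: run the trailing `if word in words` check.
def pvLoopA (board : List (List String)) (words : List (String × Bool)) :
    List (Int × Int) → String → Option String
  | [], word => if words.any (fun kv => kv.1 == word) then some word else none
  | c :: rest, word =>
    if !(decide (0 ≤ c.1 ∧ c.1 ≤ 3)) || !(decide (0 ≤ c.2 ∧ c.2 ≤ 3)) then none
    else
      (pvRead board c).bind (fun letter =>
        match rest with
        | [] =>  -- j == len(path)-1: word += letter; break; then `if word in words`
          if words.any (fun kv => kv.1 == (word ++ letter)) then some (word ++ letter) else none
        | next :: _ =>
          if pvLegalMoves.contains (c.1 - next.1, c.2 - next.2) then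
            pvLoopA board words rest (word ++ letter)
          else none)

def is_valid_path (board : List (List String)) (path : List (Int × Int)) (words : List (String × Bool)) : Option String :=
  if path.length ≠ (PySem.Set.ofList path).length then none
  else pvLoopA board words path ""

-- ===== PORT B =====
-- the board cell of a coordinate (total via pyGetD; in-bounds under the checks + Pre_,
-- exactly where Source B's board[x][y] does not raise)
def pvCell (board : List (List String)) (c : Int × Int) : String :=
  PySem.List.pyGetD (PySem.List.pyGetD board c.1 []) c.2 ""

def is_valid_path_alt (board : List (List String)) (path : List (Int × Int)) (words : List (String × Bool)) : Option String :=
  if path.length ≠ (PySem.Set.ofList path).length then none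
  else if !(path.all (fun c => decide (0 ≤ c.1 ∧ c.1 ≤ 3) && decide (0 ≤ c.2 ∧ c.2 ≤ 3))) then none
  else if !((path.zip path.tail).all (fun ab => pvLegalMoves.contains (ab.1.1 - ab.2.1, ab.1.2 - ab.2.2))) then none
  else
    let word := PySem.Str.join "" (path.map (pvCell board))
    if words.any (fun kv => kv.1 == word) then some word else none

-- ===== PRECONDITION & SPEC =====
-- Pre_ excludes the inputs on which A raises IndexError: a path coordinate inside the 0..3
-- bounds that is not a valid index into `board`. This is a slight over-approximation: it also
-- excludes some inputs where A returns None before reaching the missing cell (duplicate path,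
-- earlier out-of-bounds coordinate); B also returns None there.
def Pre_is_valid_path (board : List (List String)) (path : List (Int × Int)) (words : List (String × Bool)) : Prop :=
  ∀ c ∈ path, (0 ≤ c.1 ∧ c.1 ≤ 3 ∧ 0 ≤ c.2 ∧ c.2 ≤ 3) →
    c.1.toNat < board.length ∧ c.2.toNat < (board.getD c.1.toNat []).length
instance (board : List (List String)) (path : List (Int × Int)) (words : List (String × Bool)) : Decidable (Pre_is_valid_path board path words) := by unfold Pre_is_valid_path; infer_instance

def pvWitness_is_valid_path : List (List String) × (List (Int × Int)) × (List (String × Bool)) :=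
  ([["a", "b", "c", "d"], ["e", "f", "g", "h"], ["i", "j", "k", "l"], ["m", "n", "o", "p"]],
   [(0, 0), (0, 1)], [("ab", true)])

def Spec_is_valid_path (board : List (List String)) (path : List (Int × Int)) (words : List (String × Bool)) (out : Option String) : Prop := out = is_valid_path_alt board path words
instance (board : List (List String)) (path : List (Int × Int)) (words : List (String × Bool)) (out : Option String) : Decidable (Spec_is_valid_path board path words out) := by unfold Spec_is_valid_path; infer_instance

-- ===== CLAIM (what is proved, stated in full; the proofs are below) =====
def Claim_equal_is_valid_path : Prop := ∀ (board : List (List String)) (path : List (Int × Int)) (words : List (String × Bool)), Dom_is_valid_path board path words → Pre_is_valid_path board path words → Spec_is_valid_path board path words (is_valid_path board path words)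

-- ===== LEMMAS AND PROOFS =====

-- word accumulation of A's loop, used to characterise both programs
def pvW (board : List (List String)) : List (Int × Int) → String → String
  | [], w => w
  | c :: r, w => pvW board r (w ++ pvCell board c)

theorem pvLoopA_cons (board : List (List String)) (words : List (String × Bool))
    (c : Int × Int) (rest : List (Int × Int)) (word : String) :
    pvLoopA board words (c :: rest) word =
      if !(decide (0 ≤ c.1 ∧ c.1 ≤ 3)) || !(decide (0 ≤ c.2 ∧ c.2 ≤ 3)) then none
      else
        (pvRead board c).bind (fun letter =>
          match rest with
          | [] =>
            if words.any (fun kv => kv.1 == (word ++ letter)) then some (word ++ letter) else none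
          | next :: _ =>
            if pvLegalMoves.contains (c.1 - next.1, c.2 - next.2) then
              pvLoopA board words rest (word ++ letter)
            else none) := rfl

theorem pvBindSome {α β : Type} (a : α) (f : α → Option β) :
    (some a).bind f = f a := rfl

theorem pvGet_pos {α : Type} (xs : List α) (i : Int) (dflt : α)
    (h0 : 0 ≤ i) (h : i.toNat < xs.length) :
    PySem.List.pyGet? xs i = some (xs.getD i.toNat dflt) := by
  rw [show i = ((i.toNat : Nat) : Int) from (Int.toNat_of_nonneg h0).symm,
    PySem.List.pyGet?_natCast]
  simp [show (max i 0).toNat = i.toNat from by omega, List.getElem?_eq_getElem, h]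

theorem pvRead_eq (board : List (List String)) (c : Int × Int)
    (h1 : 0 ≤ c.1) (h2 : 0 ≤ c.2)
    (hr : c.1.toNat < board.length) (hc : c.2.toNat < (board.getD c.1.toNat []).length) :
    pvRead board c = some (pvCell board c) := by
  have hrow : PySem.List.pyGetD board c.1 [] = board.getD c.1.toNat [] := by
    rw [show c.1 = ((c.1.toNat : Nat) : Int) from (Int.toNat_of_nonneg h1).symm,
      PySem.List.pyGetD_natCast]
    simp [show (max c.1 0).toNat = c.1.toNat from by omega]
  unfold pvRead
  rw [pvGet_pos board c.1 [] h1 hr, pvBindSome, pvGet_pos _ c.2 "" h2 hc]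
  rw [pvCell, hrow, show c.2 = ((c.2.toNat : Nat) : Int) from (Int.toNat_of_nonneg h2).symm,
    PySem.List.pyGetD_natCast]
  simp [show (max c.2 0).toNat = c.2.toNat from by omega]

-- A's loop = (all bounds ok) && (all moves legal), with the word accumulated by pvW
theorem pvLoopA_eq (board : List (List String)) (words : List (String × Bool)) :
    ∀ (rest : List (Int × Int)) (word : String),
    (∀ c ∈ rest, (0 ≤ c.1 ∧ c.1 ≤ 3 ∧ 0 ≤ c.2 ∧ c.2 ≤ 3) →
      c.1.toNat < board.length ∧ c.2.toNat < (board.getD c.1.toNat []).length) →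
    pvLoopA board words rest word =
      if (rest.all (fun c => decide (0 ≤ c.1 ∧ c.1 ≤ 3) && decide (0 ≤ c.2 ∧ c.2 ≤ 3))) &&
         ((rest.zip rest.tail).all (fun ab => pvLegalMoves.contains (ab.1.1 - ab.2.1, ab.1.2 - ab.2.2))) then
        (if words.any (fun kv => kv.1 == pvW board rest word) then some (pvW board rest word) else none)
      else none
  | [], word, _ => by simp [pvLoopA, pvW]
  | c :: rest, word, hpre => by
    rw [pvLoopA_cons]
    by_cases hb : (0 ≤ c.1 ∧ c.1 ≤ 3) ∧ (0 ≤ c.2 ∧ c.2 ≤ 3)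
    · obtain ⟨hidx, hjdx⟩ := hpre c (by simp) ⟨hb.1.1, hb.1.2, hb.2.1, hb.2.2⟩
      have e := pvRead_eq board c hb.1.1 hb.2.1 hidx hjdx
      rw [if_neg (by simp [hb.1, hb.2]), e]
      simp only [pvBindSome]
      match rest with
      | [] => simp [pvW, hb.1, hb.2]
      | next :: rs =>
        dsimp only
        have ih := pvLoopA_eq board words (next :: rs) (word ++ pvCell board c)
          (fun d hd => hpre d (List.mem_cons_of_mem _ hd))
        by_cases hm : pvLegalMoves.contains (c.1 - next.1, c.2 - next.2) = true
        · rw [if_pos hm, ih]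
          have d1 : decide (0 ≤ c.1 ∧ c.1 ≤ 3) = true := decide_eq_true hb.1
          have d2 : decide (0 ≤ c.2 ∧ c.2 ≤ 3) = true := decide_eq_true hb.2
          simp only [pvW, List.zip, List.tail_cons, List.all_cons, List.zipWith_cons_cons,
            d1, d2, hm, Bool.true_and, Bool.and_assoc]
        · rw [if_neg hm]
          have hm' : (c.1 - next.1, c.2 - next.2) ∉ pvLegalMoves := by simpa using hm
          simp [List.zip, hm']
    · rw [if_pos (by rcases not_and_or.mp hb with h | h <;> simp [h])]
      rcases not_and_or.mp hb with h | h <;> simp [h]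

theorem pvJoin_nil : PySem.Str.join "" ([] : List String) = "" := by
  apply String.toList_injective
  simp [PySem.Str.toList_join, PySem.Chars.join_nil]

theorem pvJoin_cons (s : String) (L : List String) :
    PySem.Str.join "" (s :: L) = s ++ PySem.Str.join "" L := by
  apply String.toList_injective
  cases L <;>
    simp [PySem.Str.toList_join, PySem.Chars.join_nil, PySem.Chars.join_singleton,
      PySem.Chars.join_cons_cons]

theorem pvW_eq_join (board : List (List String)) :
    ∀ (l : List (Int × Int)) (w : String),
    pvW board l w = w ++ PySem.Str.join "" (l.map (pvCell board))
  | [], w => by simp [pvW, pvJoin_nil]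
  | c :: l, w => by
    rw [pvW, pvW_eq_join board l (w ++ pvCell board c), List.map_cons, pvJoin_cons,
      ← String.append_assoc]

-- ===== VERDICT (by name: the statement is the Claim_ definition above) =====
theorem is_valid_path_spec : Claim_equal_is_valid_path := by
  intro board path words _ hpre
  unfold Spec_is_valid_path is_valid_path is_valid_path_alt
  by_cases hdup : path.length ≠ (PySem.Set.ofList path).length
  · simp [hdup]
  · rw [if_neg hdup, if_neg hdup, pvLoopA_eq board words path "" hpre, pvW_eq_join]
    by_cases h1 : (path.all fun c => decide (0 ≤ c.1 ∧ c.1 ≤ 3) && decide (0 ≤ c.2 ∧ c.2 ≤ 3)) = true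
    · by_cases h2 : ((path.zip path.tail).all fun ab => pvLegalMoves.contains (ab.1.1 - ab.2.1, ab.1.2 - ab.2.2)) = true
      · rw [h1, h2]; simp
      · have h2' : ((path.zip path.tail).all fun ab => pvLegalMoves.contains (ab.1.1 - ab.2.1, ab.1.2 - ab.2.2)) = false := by
          revert h2
          cases (path.zip path.tail).all fun ab => pvLegalMoves.contains (ab.1.1 - ab.2.1, ab.1.2 - ab.2.2) <;> simp
        rw [h1, h2']; simp
    · have h1' : (path.all fun c => decide (0 ≤ c.1 ∧ c.1 ≤ 3) && decide (0 ≤ c.2 ∧ c.2 ≤ 3)) = false := by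
        revert h1
        cases path.all fun c => decide (0 ≤ c.1 ∧ c.1 ≤ 3) && decide (0 ≤ c.2 ∧ c.2 ≤ 3) <;> simp
      rw [h1']; simp
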